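-- pv_equiv track=rewrite | github.com/n30liberal/phash_utils | remove_dupes.py | group_by_phash
-- ===== SOURCE A (Python) =====
-- def group_by_phash(entries, exact_match=True, blacklisted_phashes=[]):
--     if exact_match:
--         groups = {}
--         for entry in entries:
--             phash = entry["phash"]
--             if entry["phash"] not in blacklisted_phashes:
--                 if phash in groups:
--                     groups[phash].append(entry)
--                 else:
--                     groups[phash] = [entry]
--         return groups
-- ===== SOURCE B (Python) =====
-- def group_by_phash(entries, exact_match=True, blacklisted_phashes=[]):
--     if exact_match:
--         # pass 1: the distinct non-blacklisted phashes, in first-occurrence order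
--         keys = []
--         for e in entries:
--             p = e["phash"]
--             if p not in keys and p not in blacklisted_phashes:
--                 keys.append(p)
--         # pass 2: one filter per key collects that key's group
--         return {p: [e for e in entries if e["phash"] == p] for p in keys}
-- ===== Notes on version B (the rewrite author's own statement) =====
-- stated objective: alternative
-- what changed: Replaces A's incremental dict accumulation (test-membership-then-append per entry) with a two-pass decomposition: collect the distinct non-blacklisted phashes in first-occurrence order, then build each group with one filter pass over the entries.
import Mathlib
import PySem

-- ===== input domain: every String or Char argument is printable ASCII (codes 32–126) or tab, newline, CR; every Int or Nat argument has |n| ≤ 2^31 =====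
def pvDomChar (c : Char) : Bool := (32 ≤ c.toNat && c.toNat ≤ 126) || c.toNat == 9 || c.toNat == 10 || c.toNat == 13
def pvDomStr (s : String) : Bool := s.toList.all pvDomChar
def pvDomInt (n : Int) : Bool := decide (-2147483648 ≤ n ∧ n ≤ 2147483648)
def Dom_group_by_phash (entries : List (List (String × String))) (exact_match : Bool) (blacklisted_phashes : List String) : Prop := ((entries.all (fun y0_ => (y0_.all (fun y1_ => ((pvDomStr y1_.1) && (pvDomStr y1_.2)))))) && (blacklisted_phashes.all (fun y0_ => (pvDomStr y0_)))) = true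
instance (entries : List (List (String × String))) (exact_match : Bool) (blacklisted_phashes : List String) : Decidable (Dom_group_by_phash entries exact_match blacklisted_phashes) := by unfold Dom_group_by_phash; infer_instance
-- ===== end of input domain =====

-- B groups by computing the distinct non-blacklisted phashes first and then one filter per key,
-- instead of A's incremental dict accumulation (objective: alternative decomposition, same results incl. key order).

-- ===== PORT A =====
-- entry["phash"]: dict lookup; a missing "phash" key is a Python KeyError, excluded by Pre_ (getD "" is never reached there)
def pvKey (entry : List (String × String)) : String :=
  ((PySem.Dict.mk entry).get? "phash").getD ""

def pvStepA (blacklisted_phashes : List String)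
    (groups : PySem.Dict String (List (List (String × String))))
    (entry : List (String × String)) : PySem.Dict String (List (List (String × String))) :=
  let phash := pvKey entry
  if ¬ (pvKey entry ∈ blacklisted_phashes) then
    match groups.get? phash with
    | some g => groups.insert phash (g ++ [entry])   -- groups[phash].append(entry)
    | none   => groups.insert phash [entry]          -- groups[phash] = [entry]
  else groups

def group_by_phash (entries : List (List (String × String))) (exact_match : Bool) (blacklisted_phashes : List String) : Option (List (String × List (List (String × String)))) :=
  if exact_match then
    some ((entries.foldl (pvStepA blacklisted_phashes) PySem.Dict.empty).items)
  else none

-- ===== PORT B =====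
-- pass 1 of Source B: distinct non-blacklisted phashes in first-occurrence order
def pvKeys (blacklisted_phashes : List String) (ks : List String)
    (entries : List (List (String × String))) : List String :=
  entries.foldl (fun ks e =>
    if pvKey e ∉ ks ∧ pvKey e ∉ blacklisted_phashes then ks ++ [pvKey e] else ks) ks

def group_by_phash_alt (entries : List (List (String × String))) (exact_match : Bool) (blacklisted_phashes : List String) : Option (List (String × List (List (String × String)))) :=
  if exact_match then
    let keys := pvKeys blacklisted_phashes [] entries
    -- pass 2: one filter per key collects that key's group
    some (keys.map (fun p => (p, entries.filter (fun e => pvKey e == p))))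
  else none

-- ===== PRECONDITION & SPEC =====
-- Pre_ excludes only inputs on which A raises KeyError: when exact_match, every entry must have a "phash" key.
def Pre_group_by_phash (entries : List (List (String × String))) (exact_match : Bool) (blacklisted_phashes : List String) : Prop :=
  exact_match = true → ∀ e ∈ entries, (PySem.Dict.mk e).contains "phash" = true
instance (entries : List (List (String × String))) (exact_match : Bool) (blacklisted_phashes : List String) : Decidable (Pre_group_by_phash entries exact_match blacklisted_phashes) := by unfold Pre_group_by_phash; infer_instance

def pvWitness_group_by_phash : (List (List (String × String))) × Bool × List String :=
  ([[("phash", "a"), ("file", "x")], [("phash", "b")], [("phash", "a")]], true, ["b"])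

def Spec_group_by_phash (entries : List (List (String × String))) (exact_match : Bool) (blacklisted_phashes : List String) (out : Option (List (String × List (List (String × String))))) : Prop := out = group_by_phash_alt entries exact_match blacklisted_phashes
instance (entries : List (List (String × String))) (exact_match : Bool) (blacklisted_phashes : List String) (out : Option (List (String × List (List (String × String))))) : Decidable (Spec_group_by_phash entries exact_match blacklisted_phashes out) := by unfold Spec_group_by_phash; infer_instance

-- ===== CLAIM (what is proved, stated in full; the proofs are below) =====
def Claim_equal_group_by_phash : Prop := ∀ (entries : List (List (String × String))) (exact_match : Bool) (blacklisted_phashes : List String), Dom_group_by_phash entries exact_match blacklisted_phashes → Pre_group_by_phash entries exact_match blacklisted_phashes → Spec_group_by_phash entries exact_match blacklisted_phashes (group_by_phash entries exact_match blacklisted_phashes)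

-- ===== LEMMAS AND PROOFS =====

-- membership in the key-collecting fold
theorem pv_mem_pvKeys (bl : List String) (xs : List (List (String × String))) (ks : List String) (p : String) :
    p ∈ pvKeys bl ks xs ↔ p ∈ ks ∨ (p ∉ bl ∧ ∃ e ∈ xs, pvKey e = p) := by
  induction xs generalizing ks with
  | nil => simp [pvKeys]
  | cons e xs ih =>
    simp only [pvKeys, List.foldl_cons] at *
    by_cases h : pvKey e ∉ ks ∧ pvKey e ∉ bl
    · rw [if_pos h, ih]
      constructor
      · rintro (hks | hrest)
        · rcases List.mem_append.mp hks with h1 | h1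
          · exact Or.inl h1
          · simp at h1; subst h1; exact Or.inr ⟨h.2, ⟨e, by simp⟩⟩
        · exact Or.inr ⟨hrest.1, hrest.2.imp (fun a ⟨ha, hk⟩ => ⟨by simp [ha], hk⟩)⟩
      · rintro (hks | ⟨hbl, ⟨a, ha, hk⟩⟩)
        · exact Or.inl (List.mem_append.mpr (Or.inl hks))
        · rcases List.mem_cons.mp ha with rfl | ha
          · exact Or.inl (by simp [hk])
          · exact Or.inr ⟨hbl, ⟨a, ha, hk⟩⟩
    · rw [if_neg h, ih]
      rw [not_and_or, not_not] at h
      constructor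
      · rintro (hks | hrest)
        · exact Or.inl hks
        · exact Or.inr ⟨hrest.1, hrest.2.imp (fun a ⟨ha, hk⟩ => ⟨by simp [ha], hk⟩)⟩
      · rintro (hks | ⟨hbl, ⟨a, ha, hk⟩⟩)
        · exact Or.inl hks
        · rcases List.mem_cons.mp ha with rfl | ha
          · rcases h with hke | hbl2
            · exact Or.inl (hk ▸ hke)
            · exact absurd hbl (by rw [← hk]; simpa using hbl2)
          · exact Or.inr ⟨hbl, ⟨a, ha, hk⟩⟩

theorem pv_nodup_pvKeys (bl : List String) (xs : List (List (String × String))) (ks : List String)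
    (h : ks.Nodup) : (pvKeys bl ks xs).Nodup := by
  induction xs generalizing ks with
  | nil => simpa [pvKeys] using h
  | cons e xs ih =>
    simp only [pvKeys, List.foldl_cons]
    by_cases hc : pvKey e ∉ ks ∧ pvKey e ∉ bl
    · rw [if_pos hc]; refine ih _ ?_
      rw [List.nodup_append]
      exact ⟨h, List.nodup_singleton _, by intro a ha b hb; simp at hb; subst hb; exact fun hae => hc.1 (hae ▸ ha)⟩
    · rw [if_neg hc]; exact ih _ h

theorem pv_not_bl_of_mem_pvKeys (bl : List String) (xs : List (List (String × String))) (p : String)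
    (h : p ∈ pvKeys bl [] xs) : p ∉ bl := by
  rcases (pv_mem_pvKeys bl xs [] p).mp h with h | h
  · simp at h
  · exact h.1

theorem pv_filter_nil (bl : List String) (xs : List (List (String × String))) (x : List (String × String))
    (hbl : pvKey x ∉ bl) (hk : pvKey x ∉ pvKeys bl [] xs) :
    xs.filter (fun e => pvKey e == pvKey x) = [] := by
  rw [List.filter_eq_nil_iff]
  intro e he
  simp only [beq_iff_eq]
  intro hke
  exact hk ((pv_mem_pvKeys bl xs [] (pvKey x)).mpr (Or.inr ⟨hbl, ⟨e, he, hke⟩⟩))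

theorem pvKeys_append (bl : List String) (xs : List (List (String × String))) (x : List (String × String)) :
    pvKeys bl [] (xs ++ [x]) =
      (if pvKey x ∉ pvKeys bl [] xs ∧ pvKey x ∉ bl then pvKeys bl [] xs ++ [pvKey x] else pvKeys bl [] xs) := by
  simp [pvKeys, List.foldl_append]

-- main invariant: A's accumulated dict items equal B's keys-then-filter form
theorem pv_main (bl : List String) (xs : List (List (String × String))) :
    (xs.foldl (pvStepA bl) PySem.Dict.empty).items =
      (pvKeys bl [] xs).map (fun p => (p, xs.filter (fun e => pvKey e == p))) := by
  induction xs using List.reverseRecOn with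
  | nil => simp [pvKeys]; rfl
  | append_singleton xs x ih =>
    have hkeys : (xs.foldl (pvStepA bl) PySem.Dict.empty).keys = pvKeys bl [] xs := by
      simp [PySem.Dict.keys, ih, List.map_map, Function.comp_def]
    have hnd : (xs.foldl (pvStepA bl) PySem.Dict.empty).keys.Nodup := by
      rw [hkeys]; exact pv_nodup_pvKeys bl xs [] List.nodup_nil
    rw [List.foldl_append, List.foldl_cons, List.foldl_nil, pvKeys_append]
    set d := xs.foldl (pvStepA bl) PySem.Dict.empty with hd
    by_cases hbl : pvKey x ∈ bl
    · -- blacklisted: step is identity, keys unchanged, filters unchanged on every key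
      rw [if_neg (by simp [hbl])]
      show (pvStepA bl d x).items = _
      rw [pvStepA, if_neg (by simp [hbl])]
      rw [ih]
      apply List.map_congr_left
      intro p hp
      have hpbl : p ∉ bl := pv_not_bl_of_mem_pvKeys bl xs p hp
      have hne : pvKey x ≠ p := fun h => hpbl (h ▸ hbl)
      simp [List.filter_append, hne]
    · by_cases hk : pvKey x ∈ pvKeys bl [] xs
      · -- existing key: insert overwrites in place
        rw [if_neg (by simp [hk])]
        have hmem : (pvKey x, xs.filter (fun e => pvKey e == pvKey x)) ∈ d.items := by
          rw [ih]; exact List.mem_map.mpr ⟨pvKey x, hk, rfl⟩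
        have hget : d.get? (pvKey x) = some (xs.filter (fun e => pvKey e == pvKey x)) :=
          PySem.Dict.get?_of_mem_items d hmem hnd
        show (pvStepA bl d x).items = _
        rw [pvStepA, if_pos (by simp [hbl])]
        simp only [hget]
        have hcont : d.contains (pvKey x) = true := by
          rw [PySem.Dict.contains_iff_mem_keys, hkeys]; exact hk
        rw [PySem.Dict.items_insert_of_contains d _ hcont, ih, List.map_map]
        apply List.map_congr_left
        intro p hp
        by_cases hpx : p = pvKey x
        · subst hpx; simp [List.filter_append]
        · have : ¬ (pvKey x = p) := fun h => hpx h.symm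
          simp [Function.comp, hpx, List.filter_append, this]
      · -- new key: insert appends at the end
        rw [if_pos ⟨hk, hbl⟩]
        have hget : d.get? (pvKey x) = none := by
          rw [PySem.Dict.get?_eq_none_iff_not_mem_keys, hkeys]; exact hk
        show (pvStepA bl d x).items = _
        rw [pvStepA, if_pos (by simp [hbl])]
        simp only [hget]
        have hcont : d.contains (pvKey x) = false := by
          rw [PySem.Dict.contains_eq_isSome_get?, hget]; rfl
        rw [PySem.Dict.items_insert_of_not_contains d _ hcont, ih, List.map_append]
        congr 1
        · apply List.map_congr_left
          intro p hp
          have hne : pvKey x ≠ p := fun h => hk (h ▸ hp)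
          simp [List.filter_append, hne]
        · simp [List.filter_append, pv_filter_nil bl xs x hbl hk]

-- ===== VERDICT (by name: the statement is the Claim_ definition above) =====
theorem group_by_phash_spec : Claim_equal_group_by_phash := by
  intro entries exact_match bl _ _
  unfold Spec_group_by_phash group_by_phash group_by_phash_alt
  cases exact_match with
  | false => rfl
  | true => simp only [if_pos, pv_main bl entries]
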